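-- pv_equiv track=rewrite | github.com/katemorris/advent_2021 | 10_syntax_2.py | get_closers_score
-- ===== SOURCE A (Python) =====
-- def get_closers_score(opens):
--     reversed_list = list(reversed(opens))
--     closers = []
--     for char in reversed_list:
--         if char == '<':
--             closers.append('>')
--         elif char == '(':
--             closers.append(')')
--         elif char == '{':
--             closers.append('}')
--         elif char == '[':
--             closers.append(']')
--
--     total = 0
--     for char in closers:
--         total *= 5
--         if char == ')':
--             total += 1
--         elif char == ']':
--             total += 2
--         elif char == '}':
--             total += 3
--         elif char == '>':
--             total += 4
--
--     return total
-- ===== SOURCE B (Python) =====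
-- def get_closers_score(opens):
--     digit = {'(': 1, '[': 2, '{': 3, '<': 4}
--     total = 0
--     power = 1
--     for c in opens:
--         if c in digit:
--             total += digit[c] * power
--             power *= 5
--     return total
-- ===== Notes on version B (the rewrite author's own statement) =====
-- stated objective: simpler
-- what changed: A reverses the input, builds an intermediate list of closing brackets, then evaluates it with a Horner base-5 loop; B makes one forward pass over the original list, adding digit*power for each recognized opener while maintaining the positional weight power (1,5,25,...) directly, so there is no reversal, no intermediate list and no Horner evaluation.
import Mathlib
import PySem

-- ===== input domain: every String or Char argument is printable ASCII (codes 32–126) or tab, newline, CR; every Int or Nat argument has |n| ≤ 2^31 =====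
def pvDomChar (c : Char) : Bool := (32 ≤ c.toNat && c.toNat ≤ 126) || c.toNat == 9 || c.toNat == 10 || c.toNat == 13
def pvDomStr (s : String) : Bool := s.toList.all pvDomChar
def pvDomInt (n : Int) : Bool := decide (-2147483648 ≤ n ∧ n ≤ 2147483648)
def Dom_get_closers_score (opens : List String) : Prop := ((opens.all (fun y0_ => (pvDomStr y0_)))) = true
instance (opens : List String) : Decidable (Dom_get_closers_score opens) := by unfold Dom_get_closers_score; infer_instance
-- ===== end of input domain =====

-- B replaces A's reverse + closer-list + Horner loop with one forward pass maintaining the positional base-5 weight; objective: simpler.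


-- ===== PORT A =====
def get_closers_score (opens : List String) : Int :=
  let reversed_list := opens.reverse
  let closers : List String := reversed_list.foldl (fun acc c =>
    if c == "<" then acc ++ [">"]
    else if c == "(" then acc ++ [")"]
    else if c == "{" then acc ++ ["}"]
    else if c == "[" then acc ++ ["]"]
    else acc) []
  closers.foldl (fun total c =>
    let total := total * 5
    if c == ")" then total + 1
    else if c == "]" then total + 2
    else if c == "}" then total + 3
    else if c == ">" then total + 4
    else total) 0

-- ===== PORT B =====
def get_closers_score_alt (opens : List String) : Int :=
  let digit : PySem.Dict String Int :=
    PySem.Dict.ofList [("(", 1), ("[", 2), ("{", 3), ("<", 4)]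
  (opens.foldl (fun s c =>
      match digit.get? c with   -- 'if c in digit: total += digit[c] * power; power *= 5'
      | some d => (s.1 + d * s.2, s.2 * 5)
      | none => s) ((0 : Int), (1 : Int))).1

-- ===== PRECONDITION & SPEC =====
def Spec_get_closers_score (opens : List String) (out : Int) : Prop := out = get_closers_score_alt opens
instance (opens : List String) (out : Int) : Decidable (Spec_get_closers_score opens out) := by unfold Spec_get_closers_score; infer_instance

-- ===== CLAIM (what is proved, stated in full; the proofs are below) =====
def Claim_equal_get_closers_score : Prop := ∀ (opens : List String), Dom_get_closers_score opens → Spec_get_closers_score opens (get_closers_score opens)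

-- ===== LEMMAS AND PROOFS =====

-- A's closer mapping as an option-valued function
def pvClos (c : String) : Option String :=
  if c == "<" then some ">"
  else if c == "(" then some ")"
  else if c == "{" then some "}"
  else if c == "[" then some "]"
  else none

def pvDigitsD : PySem.Dict String Int :=
  PySem.Dict.ofList [("(", 1), ("[", 2), ("{", 3), ("<", 4)]

def pvDig (c : String) : Option Int := pvDigitsD.get? c

lemma pvBuild_eq (l : List String) (acc : List String) :
    l.foldl (fun acc c =>
      if c == "<" then acc ++ [">"]
      else if c == "(" then acc ++ [")"]
      else if c == "{" then acc ++ ["}"]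
      else if c == "[" then acc ++ ["]"]
      else acc) acc = acc ++ l.filterMap pvClos := by
  induction l generalizing acc with
  | nil => simp
  | cons h t ih =>
    simp only [List.foldl_cons, List.filterMap_cons]
    by_cases h1 : h == "<"
    · have hh : h = "<" := by simpa using h1
      subst hh
      rw [show pvClos "<" = some ">" from rfl, ih]; simp
    · by_cases h2 : h == "("
      · have hh : h = "(" := by simpa using h2
        subst hh
        rw [show pvClos "(" = some ")" from rfl, ih]; simp
      · by_cases h3 : h == "{"
        · have hh : h = "{" := by simpa using h3
          subst hh
          rw [show pvClos "{" = some "}" from rfl, ih]; simp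
        · by_cases h4 : h == "["
          · have hh : h = "[" := by simpa using h4
            subst hh
            rw [show pvClos "[" = some "]" from rfl, ih]; simp
          · have hc : pvClos h = none := by simp [pvClos, h1, h2, h3, h4]
            rw [hc]
            simp only [h1, h2, h3, h4, if_false, Bool.false_eq_true]
            exact ih acc

-- A's Horner loop over the closer strings = Horner over the integer digits of the same chars
lemma pvFold_eq (l : List String) (t : Int) :
    (l.filterMap pvClos).foldl (fun total c =>
      let total := total * 5
      if c == ")" then total + 1
      else if c == "]" then total + 2
      else if c == "}" then total + 3
      else if c == ">" then total + 4
      else total) t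
    = (l.filterMap pvDig).foldl (fun a d => a * 5 + d) t := by
  induction l generalizing t with
  | nil => rfl
  | cons h tl ih =>
    simp only [List.filterMap_cons]
    by_cases h1 : h == "<"
    · have hh : h = "<" := by simpa using h1
      subst hh
      rw [show pvClos "<" = some ">" from rfl, show pvDig "<" = some 4 from by decide]
      simpa using ih (t * 5 + 4)
    · by_cases h2 : h == "("
      · have hh : h = "(" := by simpa using h2
        subst hh
        rw [show pvClos "(" = some ")" from rfl, show pvDig "(" = some 1 from by decide]
        simpa using ih (t * 5 + 1)
      · by_cases h3 : h == "{"
        · have hh : h = "{" := by simpa using h3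
          subst hh
          rw [show pvClos "{" = some "}" from rfl, show pvDig "{" = some 3 from by decide]
          simpa using ih (t * 5 + 3)
        · by_cases h4 : h == "["
          · have hh : h = "[" := by simpa using h4
            subst hh
            rw [show pvClos "[" = some "]" from rfl, show pvDig "[" = some 2 from by decide]
            simpa using ih (t * 5 + 2)
          · have hc : pvClos h = none := by simp [pvClos, h1, h2, h3, h4]
            have hd : pvDig h = none := by
              have e1 : h ≠ "<" := by simpa using h1
              have e2 : h ≠ "(" := by simpa using h2
              have e3 : h ≠ "{" := by simpa using h3
              have e4 : h ≠ "[" := by simpa using h4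
              have hofl : pvDigitsD =
                  PySem.Dict.mk [("(", 1), ("[", 2), ("{", 3), ("<", 4)] := by decide
              rw [pvDig, hofl]
              simp [PySem.Dict.get?, Ne.symm e1, Ne.symm e2, Ne.symm e3, Ne.symm e4]
            rw [hc, hd]
            exact ih t

-- B's one-pass fold skips exactly the chars pvDig rejects
lemma pvBfold_filter (l : List String) (s : Int × Int) :
    l.foldl (fun s c =>
      match pvDigitsD.get? c with
      | some d => (s.1 + d * s.2, s.2 * 5)
      | none => s) s
    = (l.filterMap pvDig).foldl (fun s d => (s.1 + d * s.2, s.2 * 5)) s := by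
  induction l generalizing s with
  | nil => rfl
  | cons h tl ih =>
    simp only [List.foldl_cons, List.filterMap_cons, pvDig]
    cases hd : pvDigitsD.get? h with
    | none => simpa using ih s
    | some d => simpa using ih (s.1 + d * s.2, s.2 * 5)

-- bridge: forward positional-weight accumulation = Horner over the reversed digit list
lemma pvForward_eq_horner (ds : List Int) (t p : Int) :
    (ds.foldl (fun s d => (s.1 + d * s.2, s.2 * 5)) (t, p)).1
    = t + p * (ds.reverse.foldl (fun a d => a * 5 + d) 0) := by
  induction ds generalizing t p with
  | nil => simp
  | cons d tl ih =>
    have hrev : ((d :: tl).reverse.foldl (fun a d => a * 5 + d) 0)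
        = (tl.reverse.foldl (fun a d => a * 5 + d) 0) * 5 + d := by
      simp [List.foldl_append]
    simp only [List.foldl_cons, hrev]
    rw [ih]
    ring

-- ===== VERDICT (by name: the statement is the Claim_ definition above) =====
theorem get_closers_score_spec : Claim_equal_get_closers_score := by
  intro opens _
  unfold Spec_get_closers_score get_closers_score get_closers_score_alt
  dsimp only
  rw [show PySem.Dict.ofList [("(", (1:Int)), ("[", 2), ("{", 3), ("<", 4)] = pvDigitsD from rfl]
  rw [pvBuild_eq, List.nil_append, pvFold_eq, pvBfold_filter,
    pvForward_eq_horner]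
  rw [show (opens.reverse.filterMap pvDig) = (opens.filterMap pvDig).reverse from by
    simp [List.filterMap_reverse]]
  ring
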